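-- pv_equiv track=rewrite | github.com/nydiokar/name-analize | analyzers/numerology.py | calculate_challenge_numbers
-- ===== SOURCE A (Python) =====
-- def calculate_challenge_numbers(first_name, last_name):
--     """Calculate challenge numbers from first and last name."""
--     def reduce_number(num):
--         while num > 9:
--             num = sum(int(d) for d in str(num))
--         return num
--
--     if not first_name or not last_name:
--         return None
--
--     # Calculate reduced values
--     first_reduced = reduce_number(sum(ord(c.lower()) - 96
--                                     for c in first_name if c.isalpha()))
--     last_reduced = reduce_number(sum(ord(c.lower()) - 96
--                                    for c in last_name if c.isalpha()))
--
--     # Challenge numbers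
--     first_challenge = abs(first_reduced - last_reduced)
--     second_challenge = abs(sum(int(d) for d in str(first_reduced)) -
--                          sum(int(d) for d in str(last_reduced)))
--
--     return {
--         "first_challenge": first_challenge,
--         "second_challenge": second_challenge,
--         "overall_challenge": reduce_number(first_challenge + second_challenge)
--     }
-- ===== SOURCE B (Python) =====
-- def calculate_challenge_numbers(first_name, last_name):
--     """Calculate challenge numbers from first and last name (closed-form digital root)."""
--     def dr(n):
--         return 0 if n == 0 else 1 + (n - 1) % 9
--
--     if not first_name or not last_name:
--         return None
--
--     def name_value(name):
--         return sum(ord(c.lower()) - 96 for c in name if c.isalpha())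
--
--     a = dr(name_value(first_name))
--     b = dr(name_value(last_name))
--     d = abs(a - b)
--     # a and b are single digits, so the two challenge numbers coincide.
--     return {
--         "first_challenge": d,
--         "second_challenge": d,
--         "overall_challenge": dr(2 * d),
--     }
-- ===== Notes on version B (the rewrite author's own statement) =====
-- stated objective: simpler
-- what changed: The iterative repeated-digit-sum reduction loop is replaced by the closed-form digital root 0 if n==0 else 1+(n-1)%9, and second_challenge's re-digit-summing of the already single-digit reduced values is dropped since it equals first_challenge.
import Mathlib
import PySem

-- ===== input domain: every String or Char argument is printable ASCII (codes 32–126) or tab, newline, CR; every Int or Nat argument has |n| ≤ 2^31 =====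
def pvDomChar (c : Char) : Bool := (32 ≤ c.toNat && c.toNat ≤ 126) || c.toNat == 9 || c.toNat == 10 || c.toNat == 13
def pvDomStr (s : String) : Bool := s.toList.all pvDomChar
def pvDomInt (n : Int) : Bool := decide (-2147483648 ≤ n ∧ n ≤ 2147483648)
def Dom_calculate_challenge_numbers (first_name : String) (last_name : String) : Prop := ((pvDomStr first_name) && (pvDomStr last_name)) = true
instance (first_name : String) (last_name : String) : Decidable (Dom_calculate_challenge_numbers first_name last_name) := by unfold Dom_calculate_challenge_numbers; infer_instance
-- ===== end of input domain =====

-- B replaces A's iterative digit-reduction loop by the closed-form digital root 1 + (n-1) % 9 and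
-- drops the redundant re-digit-summing of already single-digit values (objective: simpler).

-- ===== PORT A =====
-- (the lemmas before pvReduceNumber exist only to justify its termination, cited in decreasing_by)
-- int(d) for a one-character string d
def pvCharVal (d : Char) : Int := (PySem.Int.ofChars? [d]).getD 0

-- sum(int(d) for d in str(num))
def pvDigitSum (num : Int) : Int := ((PySem.Int.toChars num).map pvCharVal).sum

theorem pvCharVal_digitChar (d : Nat) (h : d < 10) : pvCharVal (Nat.digitChar d) = (d : Int) := by
  interval_cases d <;> decide

theorem pvCharSum_toDigitsCore (f : Nat) : ∀ (n : Nat) (acc : List Char), n < f →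
    ((Nat.toDigitsCore 10 f n acc).map pvCharVal).sum
      = ((Nat.digits 10 n).sum : Int) + ((acc.map pvCharVal).sum) := by
  induction f with
  | zero => intro n acc h; omega
  | succ f ih =>
    intro n acc h
    rw [Nat.toDigitsCore]
    by_cases h0 : n / 10 = 0
    · simp only [h0, if_true]
      have hn : n < 10 := by omega
      by_cases hz : n = 0
      · subst hz; simp [pvCharVal_digitChar]
      · rw [Nat.digits_def' (by norm_num) (Nat.pos_of_ne_zero hz)]
        simp [h0, Nat.mod_eq_of_lt hn, pvCharVal_digitChar n hn]
    · simp only [h0, if_false]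
      have hpos : 0 < n := by by_contra hc; simp [Nat.eq_zero_of_not_pos hc] at h0
      have hlt : n / 10 < f := by
        have := Nat.div_lt_self hpos (by norm_num : 1 < 10); omega
      rw [ih (n / 10) _ hlt, Nat.digits_def' (by norm_num : 1 < 10) hpos]
      simp [pvCharVal_digitChar (n % 10) (Nat.mod_lt _ (by norm_num))]
      ring

theorem pvDigitSum_eq (n : Int) (h : 0 ≤ n) :
    pvDigitSum n = ((Nat.digits 10 n.toNat).sum : Int) := by
  unfold pvDigitSum PySem.Int.toChars
  rw [if_neg (by omega)]
  rw [Nat.toDigits, pvCharSum_toDigitsCore (n.toNat + 1) n.toNat [] (by omega)]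
  simp

theorem pv_digits_sum_lt (m : Nat) (h : 10 ≤ m) : (Nat.digits 10 m).sum < m := by
  rw [Nat.digits_def' (by norm_num : 1 < 10) (by omega)]
  have h1 := Nat.digit_sum_le 10 (m / 10)
  have h2 := Nat.div_add_mod m 10
  have h3 : m / 10 ≥ 1 := by omega
  simp only [List.sum_cons]
  omega

theorem pvDigitSum_lt (num : Int) (h : 9 < num) : (pvDigitSum num).toNat < num.toNat := by
  rw [pvDigitSum_eq num (by omega)]
  have := pv_digits_sum_lt num.toNat (by omega)
  omega

-- while num > 9: num = sum(int(d) for d in str(num))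
def pvReduceNumber (num : Int) : Int :=
  if hgt : 9 < num then pvReduceNumber (pvDigitSum num) else num
termination_by num.toNat
decreasing_by exact pvDigitSum_lt num hgt

-- ===== PORT A =====
def calculate_challenge_numbers (first_name : String) (last_name : String) : Option (List (String × Int)) :=
  if first_name.toList.isEmpty || last_name.toList.isEmpty then none
  else
    let first_reduced := pvReduceNumber
      (((first_name.toList.filter PySem.Chars.isalpha).map
        (fun c => ((PySem.Chars.lowerChar c).toNat : Int) - 96)).sum)
    let last_reduced := pvReduceNumber
      (((last_name.toList.filter PySem.Chars.isalpha).map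
        (fun c => ((PySem.Chars.lowerChar c).toNat : Int) - 96)).sum)
    let first_challenge := |first_reduced - last_reduced|
    let second_challenge := |pvDigitSum first_reduced - pvDigitSum last_reduced|
    some [("first_challenge", first_challenge),
          ("second_challenge", second_challenge),
          ("overall_challenge", pvReduceNumber (first_challenge + second_challenge))]

-- ===== PORT B =====
-- closed-form digital root: 0 if n == 0 else 1 + (n - 1) % 9
def pvDr (n : Int) : Int := if n = 0 then 0 else 1 + PySem.Int.mod (n - 1) 9

def pvNameValue (name : String) : Int :=
  ((name.toList.filter PySem.Chars.isalpha).map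
    (fun c => ((PySem.Chars.lowerChar c).toNat : Int) - 96)).sum

def calculate_challenge_numbers_alt (first_name : String) (last_name : String) : Option (List (String × Int)) :=
  if first_name.toList.isEmpty || last_name.toList.isEmpty then none
  else
    let a := pvDr (pvNameValue first_name)
    let b := pvDr (pvNameValue last_name)
    let d := |a - b|
    some [("first_challenge", d),
          ("second_challenge", d),
          ("overall_challenge", pvDr (2 * d))]


-- ===== PRECONDITION & SPEC =====
def Spec_calculate_challenge_numbers (first_name : String) (last_name : String) (out : Option (List (String × Int))) : Prop := out = calculate_challenge_numbers_alt first_name last_name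
instance (first_name : String) (last_name : String) (out : Option (List (String × Int))) : Decidable (Spec_calculate_challenge_numbers first_name last_name out) := by unfold Spec_calculate_challenge_numbers; infer_instance

-- ===== CLAIM =====
def Claim_equal_calculate_challenge_numbers : Prop := ∀ (first_name : String) (last_name : String), Dom_calculate_challenge_numbers first_name last_name → Spec_calculate_challenge_numbers first_name last_name (calculate_challenge_numbers first_name last_name)

-- ===== LEMMAS AND PROOFS =====
theorem pv_digits_sum_pos (m : Nat) (h : 0 < m) : 0 < (Nat.digits 10 m).sum := by
  induction m using Nat.strong_induction_on with
  | _ m ih =>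
    rw [Nat.digits_def' (by norm_num : 1 < 10) h]
    by_cases hm : m % 10 = 0
    · have hd : 0 < m / 10 := by omega
      have := ih (m / 10) (Nat.div_lt_self h (by norm_num)) hd
      simp only [List.sum_cons]; omega
    · simp only [List.sum_cons]; omega

theorem pvDr_fixed (n : Int) (h0 : 0 ≤ n) (h9 : n ≤ 9) : pvDr n = n := by
  unfold pvDr
  by_cases hz : n = 0
  · simp [hz]
  · rw [if_neg hz, PySem.Int.mod_eq_emod_of_pos (by norm_num)]
    rw [Int.emod_eq_of_lt (by omega) (by omega)]
    ring

theorem pvDr_congr (a b : Int) (ha : 0 < a) (hb : 0 < b) (h : a % 9 = b % 9) :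
    pvDr a = pvDr b := by
  unfold pvDr
  rw [if_neg (by omega), if_neg (by omega),
    PySem.Int.mod_eq_emod_of_pos (by norm_num), PySem.Int.mod_eq_emod_of_pos (by norm_num)]
  have : (a - 1) % 9 = (b - 1) % 9 := Int.ModEq.sub_right 1 h
  omega

theorem pvDigitSum_mod9 (n : Int) (h : 0 ≤ n) : pvDigitSum n % 9 = n % 9 := by
  rw [pvDigitSum_eq n h]
  have hm : (Nat.digits 10 n.toNat).sum % 9 = n.toNat % 9 := (Nat.modEq_nine_digits_sum n.toNat).symm
  have h2 : (((Nat.digits 10 n.toNat).sum % 9 : Nat) : Int) = ((n.toNat % 9 : Nat) : Int) := congrArg _ hm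
  push_cast at h2
  omega

theorem pvReduce_eq_dr_aux (k : Nat) : ∀ (n : Int), n.toNat ≤ k → 0 ≤ n → pvReduceNumber n = pvDr n := by
  induction k with
  | zero =>
    intro n hk h
    have hn : n = 0 := by omega
    subst hn; rw [pvReduceNumber]; norm_num [pvDr]
  | succ k ih =>
    intro n hk h
    by_cases h9 : 9 < n
    · rw [pvReduceNumber, dif_pos h9]
      have hlt := pvDigitSum_lt n h9
      have hpos : 0 < pvDigitSum n := by
        rw [pvDigitSum_eq n h]
        exact_mod_cast pv_digits_sum_pos n.toNat (by omega)
      rw [ih (pvDigitSum n) (by omega) (by omega)]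
      exact pvDr_congr _ _ hpos (by omega) (pvDigitSum_mod9 n h)
    · rw [pvReduceNumber, dif_neg h9, pvDr_fixed n h (by omega)]

theorem pvReduce_eq_dr (n : Int) (h : 0 ≤ n) : pvReduceNumber n = pvDr n :=
  pvReduce_eq_dr_aux n.toNat n le_rfl h

theorem pvDigitSum_single (a : Int) (h0 : 0 ≤ a) (h9 : a ≤ 9) : pvDigitSum a = a := by
  interval_cases a <;> decide

theorem pvDr_range (n : Int) : 0 ≤ pvDr n ∧ pvDr n ≤ 9 := by
  unfold pvDr
  by_cases hz : n = 0
  · simp [hz]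
  · rw [if_neg hz]
    have h1 := PySem.Int.mod_nonneg (n - 1) (by norm_num : (0:Int) < 9)
    have h2 := PySem.Int.mod_lt (n - 1) (by norm_num : (0:Int) < 9)
    omega

theorem pv_char_le_iff (a b : Char) : a ≤ b ↔ a.toNat ≤ b.toNat := ⟨Fin.mk_le_mk.mp, Fin.mk_le_mk.mpr⟩

-- for an alpha character, ord(c.lower()) is in [97, 122], so the summand is positive
theorem pv_alpha_lower_bounds (c : Char) (hc : PySem.Chars.isalpha c = true) :
    97 ≤ (PySem.Chars.lowerChar c).toNat ∧ (PySem.Chars.lowerChar c).toNat ≤ 122 := by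
  simp only [PySem.Chars.isalpha, Bool.or_eq_true, PySem.Chars.isupper, PySem.Chars.islower,
    Bool.and_eq_true, decide_eq_true_eq, pv_char_le_iff] at hc
  unfold PySem.Chars.lowerChar
  by_cases hu : PySem.Chars.isupper c = true
  · simp only [hu, if_true]
    simp only [PySem.Chars.isupper, Bool.and_eq_true, decide_eq_true_eq, pv_char_le_iff] at hu
    have hA : ('A').toNat = 65 := by decide
    have hZ : ('Z').toNat = 90 := by decide
    rw [Char.toNat_ofNat, if_pos (Or.inl (by omega))]
    omega
  · rw [if_neg hu]
    simp only [PySem.Chars.isupper, Bool.and_eq_true, decide_eq_true_eq, pv_char_le_iff,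
      Decidable.not_and_iff_or_not, not_le] at hu
    have hA : ('A').toNat = 65 := by decide
    have hZ : ('Z').toNat = 90 := by decide
    have ha : ('a').toNat = 97 := by decide
    have hz : ('z').toNat = 122 := by decide
    omega

theorem pvNameValue_nonneg (s : String) : 0 ≤ pvNameValue s := by
  unfold pvNameValue
  apply List.sum_nonneg
  intro x hx
  simp only [List.mem_map, List.mem_filter] at hx
  obtain ⟨c, ⟨_, hc⟩, rfl⟩ := hx
  have := pv_alpha_lower_bounds c hc
  omega

theorem pv_main (fn ln : String) :
    calculate_challenge_numbers fn ln = calculate_challenge_numbers_alt fn ln := by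
  unfold calculate_challenge_numbers calculate_challenge_numbers_alt
  cases he : (fn.toList.isEmpty || ln.toList.isEmpty) with
  | true => simp
  | false =>
    simp only [Bool.false_eq_true, if_false]
    have hf : pvReduceNumber (((fn.toList.filter PySem.Chars.isalpha).map
        (fun c => ((PySem.Chars.lowerChar c).toNat : Int) - 96)).sum) = pvDr (pvNameValue fn) := by
      rw [show ((fn.toList.filter PySem.Chars.isalpha).map
        (fun c => ((PySem.Chars.lowerChar c).toNat : Int) - 96)).sum = pvNameValue fn from rfl]
      exact pvReduce_eq_dr _ (pvNameValue_nonneg fn)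
    have hl : pvReduceNumber (((ln.toList.filter PySem.Chars.isalpha).map
        (fun c => ((PySem.Chars.lowerChar c).toNat : Int) - 96)).sum) = pvDr (pvNameValue ln) := by
      rw [show ((ln.toList.filter PySem.Chars.isalpha).map
        (fun c => ((PySem.Chars.lowerChar c).toNat : Int) - 96)).sum = pvNameValue ln from rfl]
      exact pvReduce_eq_dr _ (pvNameValue_nonneg ln)
    rw [hf, hl]
    obtain ⟨ha0, ha9⟩ := pvDr_range (pvNameValue fn)
    obtain ⟨hb0, hb9⟩ := pvDr_range (pvNameValue ln)
    rw [pvDigitSum_single _ ha0 ha9, pvDigitSum_single _ hb0 hb9]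
    have hd0 : 0 ≤ |pvDr (pvNameValue fn) - pvDr (pvNameValue ln)| := abs_nonneg _
    rw [pvReduce_eq_dr _ (by omega)]
    rw [two_mul]

-- ===== VERDICT =====
theorem calculate_challenge_numbers_spec : Claim_equal_calculate_challenge_numbers := by
  intro fn ln _
  unfold Spec_calculate_challenge_numbers
  exact pv_main fn ln
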